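-- pv_equiv track=rewrite | github.com/extremejhr/Smart_Testr | Smart_Tester/smrtrpy.py | string_process
-- ===== SOURCE A (Python) =====
-- def string_process(string_input):
--
--     string_temp = string_input.split(' ')
--
--     string_combination = [string_temp]
--
--     for i in range(1, len(string_temp)):
--
--         for j in range(len(string_temp) - i):
--
--             string_sort = ''.join(string_temp[j:j + i + 1])
--
--             string_combination.append([''.join(string_temp[0:j]), string_sort, ''.join(string_temp[j + i + 1:])])
--
--     for i in range(len(string_combination)):
--
--         while '' in string_combination[i]:
--
--             string_combination[i].remove('')
--
--     return string_combination
-- ===== SOURCE B (Python) =====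
-- def string_process(string_input):
--     words = string_input.split(' ')
--     n = len(words)
--     pre = [''.join(words[:k]) for k in range(n + 1)]
--     result = [[w for w in words if w != '']]
--     for L in range(2, n + 1):
--         for j in range(n - L + 1):
--             parts = (pre[j], pre[j + L][len(pre[j]):], pre[n][len(pre[j + L]):])
--             result.append([p for p in parts if p != ''])
--     return result
-- ===== Notes on version B (the rewrite author's own statement) =====
-- stated objective: alternative
-- what changed: B precomputes a prefix-concatenation table and derives each (prefix, middle, suffix) triple by length-based slicing of table entries, filtering empty parts inline, instead of re-joining word slices for every segment and running a separate while-remove cleanup pass.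
import Mathlib
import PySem

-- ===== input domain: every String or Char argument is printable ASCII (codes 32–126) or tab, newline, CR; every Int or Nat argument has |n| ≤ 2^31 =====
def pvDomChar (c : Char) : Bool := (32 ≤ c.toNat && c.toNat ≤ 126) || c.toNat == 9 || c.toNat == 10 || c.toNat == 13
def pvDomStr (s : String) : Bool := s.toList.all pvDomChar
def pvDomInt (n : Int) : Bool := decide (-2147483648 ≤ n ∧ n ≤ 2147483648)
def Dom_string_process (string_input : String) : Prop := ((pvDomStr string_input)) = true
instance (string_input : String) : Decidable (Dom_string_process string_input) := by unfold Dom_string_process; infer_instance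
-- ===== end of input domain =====

-- B builds a prefix-concatenation table and slices it instead of re-joining word
-- slices per segment and running a removal pass (objective: alternative decomposition).

-- ===== PORT A =====

-- "while '' in lst: lst.remove('')" — repeated first-occurrence removal
def pvStripLoop (l : List String) : List String :=
  if h : "" ∈ l then
    pvStripLoop ((PySem.List.remove? l "").getD l)
  else l
termination_by l.length
decreasing_by
  simp [PySem.List.remove?_eq_some_erase _ _ h]
  rw [List.length_erase_of_mem h]
  exact Nat.sub_lt (List.length_pos_of_mem h) one_pos

def string_process (string_input : String) : List (List String) :=
  let string_temp := (PySem.Str.split? string_input " ").getD []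
  let n : Int := string_temp.length
  let comb :=
    (PySem.List.pyRange 1 n 1).foldl (fun acc i =>
      (PySem.List.pyRange 0 (n - i) 1).foldl (fun acc2 j =>
        acc2 ++ [[PySem.Str.join "" (PySem.List.slice string_temp (some 0) (some j)),
                  PySem.Str.join "" (PySem.List.slice string_temp (some j) (some (j + i + 1))),
                  PySem.Str.join "" (PySem.List.slice string_temp (some (j + i + 1)) none)]]) acc)
      [string_temp]
  comb.map pvStripLoop

-- ===== PORT B =====

def string_process_alt (string_input : String) : List (List String) :=
  let words := (PySem.Str.split? string_input " ").getD []
  let n := words.length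
  -- prefix table: pre[k] = ''.join(words[:k])  (strings modelled as their char lists)
  let pre : List (List Char) := (List.range (n + 1)).map (fun k => ((words.take k).map String.toList).flatten)
  [words.filter (fun w => w ≠ "")] ++
    ((List.range (n - 1)).map (fun m => m + 2)).flatMap (fun L =>
      (List.range (n - L + 1)).map (fun j =>
        (([pre.getD j [], (pre.getD (j + L) []).drop (pre.getD j []).length,
           (pre.getD n []).drop (pre.getD (j + L) []).length].filter (fun p => p ≠ [])).map String.ofList)))

-- ===== PRECONDITION & SPEC =====
def Spec_string_process (string_input : String) (out : List (List String)) : Prop := out = string_process_alt string_input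
instance (string_input : String) (out : List (List String)) : Decidable (Spec_string_process string_input out) := by unfold Spec_string_process; infer_instance

-- ===== CLAIM (what is proved, stated in full; the proofs are below) =====
def Claim_equal_string_process : Prop := ∀ (string_input : String), Dom_string_process string_input → Spec_string_process string_input (string_process string_input)

-- ===== LEMMAS AND PROOFS =====

theorem pvFilterErase (l : List String) : (l.erase "").filter (fun x => x ≠ "") = l.filter (fun x => x ≠ "") := by
  induction l with
  | nil => rfl
  | cons a t ih =>
    by_cases ha : a = ""
    · subst ha; simp
    · rw [List.erase_cons_tail (by simp [ha])]
      simp only [List.filter_cons]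
      rw [ih]

theorem pvStrip_eq_filter (l : List String) : pvStripLoop l = l.filter (fun x => x ≠ "") := by
  induction l using pvStripLoop.induct with
  | case1 l h ih =>
    rw [pvStripLoop]
    simp only [h, dite_true, PySem.List.remove?_eq_some_erase _ _ h, Option.getD_some] at ih ⊢
    rw [ih, pvFilterErase]
  | case2 l h =>
    rw [pvStripLoop]; simp only [h, dite_false]
    exact (List.filter_eq_self.mpr (fun a hm => by simp; rintro rfl; exact h hm)).symm

theorem pvJoinNil (css : List (List Char)) : PySem.Chars.join [] css = css.flatten := by
  induction css with
  | nil => simp [PySem.Chars.join_nil]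
  | cons c rest ih =>
    cases rest with
    | nil => simp [PySem.Chars.join_singleton]
    | cons d r => rw [PySem.Chars.join_cons_cons]; simp_all

theorem pvJoinEmpty (parts : List String) :
    PySem.Str.join "" parts = String.ofList ((parts.map String.toList).flatten) := by
  apply String.toList_injective  -- check name
  rw [PySem.Str.toList_join, String.toList_ofList]
  simpa using pvJoinNil (parts.map String.toList)


theorem pvFilterOfList (cs : List (List Char)) :
    (cs.map String.ofList).filter (fun x => x ≠ "") = (cs.filter (fun p => p ≠ [])).map String.ofList := by
  rw [List.filter_map]
  congr 1
  apply List.filter_congr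
  intro p _
  simp only [Function.comp_apply, decide_eq_decide]
  constructor
  · intro h hp; subst hp; exact h rfl
  · intro h hp
    apply h
    have := congrArg String.toList hp
    simpa [String.toList_ofList] using this

theorem pvDropFlat (u v : List String) :
    List.drop ((u.map String.toList).flatten).length (((u ++ v).map String.toList).flatten)
      = (v.map String.toList).flatten := by
  rw [List.map_append, List.flatten_append, List.drop_left]

theorem pvMidFlat (l : List String) (m k : ℕ) :
    List.drop ((List.map String.toList (List.take m l)).flatten).length
        ((List.map String.toList (List.take (m + k) l)).flatten)
      = (List.map String.toList (List.take k (List.drop m l))).flatten := by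
  have := pvDropFlat (List.take m l) (List.take k (List.drop m l))
  rwa [← List.take_add] at this

theorem pvSuffixFlat (l : List String) (m : ℕ) :
    List.drop ((List.map String.toList (List.take m l)).flatten).length
        ((List.map String.toList l).flatten)
      = (List.map String.toList (List.drop m l)).flatten := by
  have := pvDropFlat (List.take m l) (List.drop m l)
  rwa [List.take_append_drop] at this

theorem string_process_eq (s : String) : string_process s = string_process_alt s := by
  unfold string_process string_process_alt
  set words := (PySem.Str.split? s " ").getD [] with hw
  simp only [PySem.List.foldl_append_singleton_eq_map, PySem.List.foldl_append_eq_flatMap,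
    List.map_append, List.map_cons, List.map_nil]
  rw [pvStrip_eq_filter]
  congr 1
  rw [PySem.List.pyRange_one, List.map_flatMap, List.flatMap_map, List.flatMap_map]
  have h1 : ((words.length : ℤ) - 1).toNat = words.length - 1 := by omega
  rw [h1]
  apply List.flatMap_congr
  intro k hk
  rw [List.mem_range] at hk
  have h2 : ((words.length : ℤ) - (1 + ↑k)) = ((words.length - (k+1) : ℕ) : ℤ) := by omega
  rw [h2, PySem.List.pyRange_zero_nat, List.map_map, List.map_map]
  have h3 : words.length - (k+2) + 1 = words.length - (k+1) := by omega
  rw [h3]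
  apply List.map_congr_left
  intro t ht
  rw [List.mem_range] at ht
  simp only [Function.comp]
  have hcast : ((t:ℤ) + (1 + ↑k) + 1) = ((t:ℤ) + ((k+2 : ℕ) : ℤ)) := by push_cast; ring
  rw [pvStrip_eq_filter, hcast, PySem.List.slice_zero_start, PySem.List.slice_to_natCast,
      PySem.List.slice_natCast_add]
  have hcast2 : ((t:ℤ) + ((k+2:ℕ):ℤ)) = (((t + (k+2) : ℕ)) : ℤ) := by push_cast; ring
  rw [hcast2, PySem.List.slice_from_natCast]
  simp only [pvJoinEmpty]
  rw [PySem.List.getD_map_range _ _ t _ (by omega),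
      PySem.List.getD_map_range _ _ (t + (k+2)) _ (by omega),
      PySem.List.getD_map_range _ _ words.length _ (by omega)]
  rw [List.take_length]
  have hml : ∀ a b c : List Char,
      [String.ofList a, String.ofList b, String.ofList c] = List.map String.ofList [a, b, c] := by
    intros; rfl
  rw [hml, pvFilterOfList, pvMidFlat, pvSuffixFlat]

-- ===== VERDICT (by name: the statement is the Claim_ definition above) =====
theorem string_process_spec : Claim_equal_string_process := by
  intro s _
  unfold Spec_string_process
  exact string_process_eq s
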